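-- pv_equiv track=rewrite | github.com/nOeulll/Python-coding_test-notes | Sort/programmers/가장 큰 수1.py | solution
-- ===== SOURCE A (Python) =====
-- import copy
--
-- def solution(numbers):
--     # numbers = [675, 10, 2]
--     numbers_copy = copy.deepcopy(numbers)
--     list = []
--     cmp_list = []
--     str_list = []
--
--     for i in range(len(numbers_copy)):
--         while(numbers_copy[i] != 0):
--             list.append(numbers_copy[i] % 10)
--             numbers_copy[i] = numbers_copy[i] // 10
--
--         cmp_list.append(list[-1])
--
--     for _ in range(len(cmp_list)):
--         max_num = max(cmp_list)
--         max_i = cmp_list.index(max_num)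
--         str_list.append(str(numbers[max_i]))
--         cmp_list[max_i] = 0
--
--     answer = ''.join(str_list)
--
--     return answer
-- ===== SOURCE B (Python) =====
-- def solution(numbers):
--     # bucket by leading digit: one pass in, one pass out, no max/index scans
--     buckets = [[] for _ in range(10)]
--     for n in numbers:
--         d = n
--         while d >= 10:
--             d //= 10
--         buckets[d].append(str(n))
--     return ''.join(s for d in range(9, -1, -1) for s in buckets[d])
-- ===== Notes on version B (the rewrite author's own statement) =====
-- stated objective: faster
-- what changed: Replaces the digit-list building plus selection-sort (repeated max/index scans over cmp_list) with a single bucketing pass into 10 leading-digit buckets and one concatenation pass from digit 9 down to 0.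
-- outside the precondition, e.g. on solution([2, 0, 1]): A returns '201', B returns '210'; on solution([0]): A raises IndexError, B returns '0'; on solution([-3]): A does not finish within the time limit, B returns '-3'
import Mathlib
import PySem

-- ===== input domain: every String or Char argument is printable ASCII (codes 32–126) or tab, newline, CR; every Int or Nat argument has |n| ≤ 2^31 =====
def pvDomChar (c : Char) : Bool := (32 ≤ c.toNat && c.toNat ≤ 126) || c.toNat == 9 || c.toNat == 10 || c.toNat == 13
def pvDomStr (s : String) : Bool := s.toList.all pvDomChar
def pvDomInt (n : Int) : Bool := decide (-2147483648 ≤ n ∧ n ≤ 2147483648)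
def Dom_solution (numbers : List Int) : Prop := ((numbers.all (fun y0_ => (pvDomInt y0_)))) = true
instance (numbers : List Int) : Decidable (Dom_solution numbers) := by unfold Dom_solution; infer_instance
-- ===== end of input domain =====

-- B replaces A's selection sort over leading digits by a 10-bucket single pass (faster); equivalence on positive entries.

-- ===== PORT A =====
-- A's inner while loop: append n % 10, then n //= 10, until n = 0.  Python DIVERGES for
-- n < 0 (n // 10 never reaches 0); those inputs are outside Pre_solution and the port stops there.
def solDigits (lst : List Int) (n : Int) : List Int :=
  if h : 0 < n then solDigits (lst ++ [PySem.Int.mod n 10]) (PySem.Int.floordiv n 10)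
  else lst
termination_by n.toNat
decreasing_by
  have h10 : PySem.Int.floordiv n 10 = n / 10 := PySem.Int.floordiv_eq_ediv_of_pos (by omega)
  rw [h10]; omega

-- first for-loop body: run the while loop on numbers_copy[i], then cmp_list.append(list[-1]).
-- list[-1] raises IndexError when the shared list is still empty (first entry 0) — outside Pre_solution.
def solPhase1 (st : List Int × List Int) (n : Int) : List Int × List Int :=
  let lst := solDigits st.1 n
  (lst, st.2 ++ [(PySem.List.pyGet? lst (-1)).getD 0])

-- second for-loop: k iterations of max / index / append str(numbers[max_i]) / cmp_list[max_i] = 0.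
-- max([]) raises ValueError only when numbers = [], where this loop runs 0 times.
def solSelect (numbers : List Int) : Nat → List Int → List String → List String
  | 0, _, strs => strs
  | k+1, cmp, strs =>
    let maxNum := (PySem.List.max? cmp (fun y => y)).getD 0
    let maxI := (PySem.List.index? cmp maxNum).getD 0
    solSelect numbers k (PySem.List.pySetD cmp (maxI : Int) 0)
      (strs ++ [PySem.Int.toStr ((PySem.List.pyGet? numbers (maxI : Int)).getD 0)])

def solution (numbers : List Int) : String :=
  let cmp := (numbers.foldl solPhase1 ([], [])).2
  PySem.Str.join "" (solSelect numbers cmp.length cmp [])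

-- ===== PORT B =====
-- B's while loop: d //= 10 until d < 10.  Diverges in Python only for no input (condition d >= 10 with d
-- decreasing); exact for all d ≥ 0; for d < 10 it returns d at once, like Python.
def altLead (d : Int) : Int :=
  if h : 10 ≤ d then altLead (PySem.Int.floordiv d 10) else d
termination_by d.toNat
decreasing_by
  have h10 : PySem.Int.floordiv d 10 = d / 10 := PySem.Int.floordiv_eq_ediv_of_pos (by omega)
  rw [h10]; omega

-- buckets[d].append(str(n)).  For d < 0 Python wraps (or raises when d ≤ -11) — that happens only for
-- n ≤ 0, outside Pre_solution; the port leaves the buckets unchanged there.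
def altPush (b : List (List String)) (n : Int) : List (List String) :=
  let d := altLead n
  if 0 ≤ d ∧ d < 10 then b.set d.toNat ((b.getD d.toNat []) ++ [PySem.Int.toStr n]) else b

def solution_alt (numbers : List Int) : String :=
  let buckets := numbers.foldl altPush (List.replicate 10 [])
  PySem.Str.join ""
    ((PySem.List.pyRange 9 (-1) (-1)).foldl (fun acc d => acc ++ buckets.getD d.toNat []) [])

-- ===== PRECONDITION & SPEC =====
-- Pre_ excludes lists with a nonpositive entry: A loops forever on a negative number, raises IndexError
-- when the first entry is 0, and on a later 0 silently reuses the previous number's leading digit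
-- (an artefact of the shared digit list).
def Pre_solution (numbers : List Int) : Prop := ∀ n ∈ numbers, 1 ≤ n
instance (numbers : List Int) : Decidable (Pre_solution numbers) := by unfold Pre_solution; infer_instance
def pvWitness_solution : List Int := [675, 10, 2]

def Spec_solution (numbers : List Int) (out : String) : Prop := out = solution_alt numbers
instance (numbers : List Int) (out : String) : Decidable (Spec_solution numbers out) := by unfold Spec_solution; infer_instance

-- ===== CLAIM (what is proved, stated in full; the proofs are below) =====
def Claim_equal_solution : Prop := ∀ (numbers : List Int), Dom_solution numbers → Pre_solution numbers → Spec_solution numbers (solution numbers)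

-- ===== LEMMAS AND PROOFS =====

-- the string segment contributed by leading digit d, in input order
def seg (numbers cmp : List Int) (d : Int) : List String :=
  ((numbers.zip cmp).filter (fun p => p.2 = d)).map (fun p => PySem.Int.toStr p.1)

-- segments for digits d, d-1, …, 1 concatenated
def ordD (numbers cmp : List Int) : Nat → List String
  | 0 => []
  | d+1 => seg numbers cmp ((d : Int)+1) ++ ordD numbers cmp d

theorem altLead_bounds (n : Int) (h : 1 ≤ n) : 1 ≤ altLead n ∧ altLead n ≤ 9 := by
  by_cases h10 : 10 ≤ n
  · rw [altLead, dif_pos h10]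
    have hfd : PySem.Int.floordiv n 10 = n / 10 := PySem.Int.floordiv_eq_ediv_of_pos (by omega)
    exact hfd ▸ altLead_bounds (n / 10) (by omega)
  · rw [altLead, dif_neg h10]; omega
termination_by n.toNat
decreasing_by
  have h10' : PySem.Int.floordiv n 10 = n / 10 := PySem.Int.floordiv_eq_ediv_of_pos (by omega)
  omega

theorem solDigits_last (n : Int) (h : 1 ≤ n) (lst : List Int) :
    ∃ pre, solDigits lst n = pre ++ [altLead n] := by
  have hfd : PySem.Int.floordiv n 10 = n / 10 := PySem.Int.floordiv_eq_ediv_of_pos (by omega)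
  by_cases h10 : 10 ≤ n
  · rw [solDigits, dif_pos (by omega), altLead, dif_pos h10, hfd]
    exact solDigits_last (n / 10) (by omega) _
  · have hm : PySem.Int.mod n 10 = n := by
      have := PySem.Int.mod_eq_emod_of_pos (a := n) (b := 10) (by omega)
      omega
    rw [solDigits, dif_pos (by omega), altLead, dif_neg h10, hfd, hm,
        solDigits, dif_neg (by omega)]
    exact ⟨lst, rfl⟩
termination_by n.toNat
decreasing_by omega

theorem phase1_cmp (numbers : List Int) (h : ∀ n ∈ numbers, 1 ≤ n) : ∀ st : List Int × List Int,
    (numbers.foldl solPhase1 st).2 = st.2 ++ numbers.map altLead := by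
  induction numbers with
  | nil => intro st; simp
  | cons a t ih =>
    intro st
    obtain ⟨pre, hpre⟩ := solDigits_last a (h a (by simp)) st.1
    rw [List.foldl_cons, ih (fun n hn => h n (by simp [hn]))]
    simp [solPhase1, hpre, PySem.List.pyGet?_neg_one_append_singleton]

theorem set_append_len (pre suf : List Int) (m v : Int) :
    (pre ++ m :: suf).set pre.length v = pre ++ v :: suf := by
  induction pre with
  | nil => rfl
  | cons a t ih => simp [List.set, ih]

theorem seg_split (npre nsuf : List Int) (x : Int) (pre suf : List Int)
    (hl : npre.length = pre.length) (v d : Int) :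
    seg (npre ++ x :: nsuf) (pre ++ v :: suf) d =
      seg npre pre d ++ (if v = d then [PySem.Int.toStr x] else []) ++ seg nsuf suf d := by
  simp only [seg, List.zip_append hl, List.zip_cons_cons, List.filter_append, List.filter_cons,
    List.map_append]
  by_cases hv : v = d <;> simp [hv]

theorem seg_pre_nil (npre : List Int) (pre : List Int) (d : Int) (hd : d ∉ pre) :
    seg npre pre d = [] := by
  simp only [seg, List.map_eq_nil_iff, List.filter_eq_nil_iff]
  intro p hp hpd
  exact hd (by simpa [decide_eq_true_iff.mp hpd] using (List.of_mem_zip hp).2)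

theorem seg_all_le (npre : List Int) (pre : List Int) (d m : Int) (hm : m < d)
    (hle : ∀ y ∈ pre, y ≤ m) : seg npre pre d = [] := by
  simp only [seg, List.map_eq_nil_iff, List.filter_eq_nil_iff]
  intro p hp hpd
  have h2 := hle p.2 (List.of_mem_zip hp).2
  have h3 := decide_eq_true_iff.mp hpd
  omega

theorem ordD_lt (npre nsuf : List Int) (x : Int) (pre suf : List Int)
    (hl : npre.length = pre.length) (m : Int) (hm : 1 ≤ m) :
    ∀ d : Nat, (d : Int) < m →
    ordD (npre ++ x :: nsuf) (pre ++ m :: suf) d = ordD (npre ++ x :: nsuf) (pre ++ 0 :: suf) d := by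
  intro d
  induction d with
  | zero => intro _; rfl
  | succ d ih =>
    intro hdm
    rw [ordD, ordD, seg_split _ _ _ _ _ hl, seg_split _ _ _ _ _ hl,
      if_neg (by push_cast; omega), if_neg (by push_cast; omega), ih (by push_cast; omega)]

theorem ordD_split (npre nsuf : List Int) (x : Int) (pre suf : List Int)
    (hl : npre.length = pre.length) (m : Int) (hm : 1 ≤ m) (hpre : m ∉ pre)
    (hle : ∀ y ∈ pre ++ m :: suf, y ≤ m) :
    ∀ d : Nat, m ≤ (d : Int) →
    ordD (npre ++ x :: nsuf) (pre ++ m :: suf) d =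
      PySem.Int.toStr x :: ordD (npre ++ x :: nsuf) (pre ++ 0 :: suf) d := by
  intro d
  induction d with
  | zero => intro h0; exact absurd h0 (by push_cast; omega)
  | succ d ih =>
    intro hdm
    rw [ordD, ordD, seg_split _ _ _ _ _ hl, seg_split _ _ _ _ _ hl]
    by_cases hmd : m = (d : Int) + 1
    · rw [if_pos (by push_cast; omega), if_neg (by push_cast; omega),
        seg_pre_nil _ _ _ (by simpa [hmd] using hpre),
        ordD_lt _ _ _ _ _ hl m hm d (by omega)]
      simp
    · have hmle : m ≤ (d : Int) := by push_cast at hdm ⊢; omega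
      rw [if_neg (by push_cast; omega), if_neg (by push_cast; omega), ih hmle]
      have hseg : seg npre pre ((d : Int) + 1) = [] :=
        seg_all_le _ _ _ m (by omega) (fun y hy => hle y (by simp [hy]))
      have hseg2 : seg nsuf suf ((d : Int) + 1) = [] :=
        seg_all_le _ _ _ m (by omega) (fun y hy => hle y (by simp [hy]))
      simp [hseg, hseg2]

theorem ordD_zero (numbers cmp : List Int) (h0 : ∀ y ∈ cmp, y = 0) :
    ∀ d : Nat, ordD numbers cmp d = [] := by
  intro d
  induction d with
  | zero => rfl
  | succ d ih =>
    rw [ordD, ih, seg_all_le _ _ _ 0 (by push_cast; omega) (fun y hy => by rw [h0 y hy]),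
      List.nil_append]

theorem select_eq (numbers : List Int) : ∀ (k : Nat) (cmp : List Int) (strs : List String),
    cmp.length = numbers.length →
    (∀ x ∈ cmp, 0 ≤ x ∧ x ≤ 9) →
    cmp.countP (fun x => decide (0 < x)) = k →
    solSelect numbers k cmp strs = strs ++ ordD numbers cmp 9 := by
  intro k
  induction k with
  | zero =>
    intro cmp strs hlen hb hc
    have h0 : ∀ y ∈ cmp, y = 0 := by
      intro y hy
      have h1 := (hb y hy).1
      by_contra hne
      have : 0 < cmp.countP (fun x => decide (0 < x)) :=
        List.countP_pos_iff.mpr ⟨y, hy, by simp; omega⟩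
      omega
    rw [solSelect, ordD_zero numbers cmp h0 9, List.append_nil]
  | succ k ih =>
    intro cmp strs hlen hb hc
    -- the maximum and its first index
    have hne : cmp ≠ [] := by
      intro h; subst h; simp [List.countP, List.countP.go] at hc
    obtain ⟨m, hm⟩ : ∃ m, PySem.List.max? cmp (fun y => y) = some m := by
      cases h : PySem.List.max? cmp (fun y => y) with
      | none => exact absurd ((PySem.List.max?_eq_none_iff _ _).mp h) hne
      | some m => exact ⟨m, rfl⟩
    have hmem : m ∈ cmp := PySem.List.max?_mem hm
    have hmax : ∀ y ∈ cmp, y ≤ m := fun y hy => PySem.List.max?_isMax hm y hy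
    have hm1 : 1 ≤ m := by
      obtain ⟨y, hy, hy0⟩ := List.countP_pos_iff.mp (by omega : 0 < cmp.countP (fun x => decide (0 < x)))
      have := hmax y hy
      simp at hy0
      omega
    obtain ⟨i, hi⟩ : ∃ i, PySem.List.index? cmp m = some i := by
      cases h : PySem.List.index? cmp m with
      | none => exact absurd ((PySem.List.index?_eq_none_iff _ _).mp h) (by simp [hmem])
      | some i => exact ⟨i, rfl⟩
    obtain ⟨pre, suf, hsplit, hprelen, hmpre⟩ := ((PySem.List.index?_eq_some_iff _ _ _).mp hi)
    have hilt : i < numbers.length := by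
      rw [← hlen, hsplit]; simp [← hprelen]
    -- decompose numbers at index i
    have hnum : numbers = numbers.take i ++ numbers[i] :: numbers.drop (i + 1) := by
      rw [List.getElem_cons_drop, List.take_append_drop]
    have htlen : (numbers.take i).length = pre.length := by
      simp [hprelen, Nat.min_eq_left (Nat.le_of_lt hilt)]
    -- one unfolding of the loop
    have hset : PySem.List.pySetD cmp (i : Int) 0 = pre ++ 0 :: suf := by
      rw [PySem.List.pySetD_natCast, hsplit, ← hprelen, set_append_len]
    have hget : (PySem.List.pyGet? numbers (i : Int)).getD 0 = numbers[i] := by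
      rw [PySem.List.pyGet?_natCast, List.getElem?_eq_getElem hilt]; rfl
    rw [solSelect]
    simp only [hm, hi, Option.getD_some, hset, hget]
    -- the recursive call via the induction hypothesis
    have hlen' : (pre ++ 0 :: suf).length = numbers.length := by
      rw [← hlen, hsplit]; simp
    have hb' : ∀ x ∈ pre ++ 0 :: suf, 0 ≤ x ∧ x ≤ 9 := by
      intro x hx
      rcases List.mem_append.mp hx with h | h
      · exact hb x (by rw [hsplit]; simp [h])
      · rcases List.mem_cons.mp h with h | h
        · subst h; have := hb m (by rw [hsplit]; simp); omega
        · exact hb x (by rw [hsplit]; simp [h])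
    have hc' : (pre ++ 0 :: suf).countP (fun x => decide (0 < x)) = k := by
      rw [hsplit] at hc
      have hdm : decide ((0:Int) < m) = true := decide_eq_true_iff.mpr (by omega)
      simp only [List.countP_append, List.countP_cons, hdm] at hc ⊢
      simp at hc ⊢
      omega
    rw [ih (pre ++ 0 :: suf) _ hlen' hb' hc']
    -- reorganise via ordD_split
    have hle' : ∀ y ∈ pre ++ m :: suf, y ≤ m := by
      intro y hy; exact hmax y (by rw [hsplit]; exact hy)
    have h9 : m ≤ ((9 : Nat) : Int) := by
      have := (hb m hmem).2; push_cast; omega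
    have := ordD_split (numbers.take i) (numbers.drop (i + 1)) numbers[i] pre suf htlen m hm1 hmpre hle' 9 h9
    rw [← hnum] at this
    rw [hsplit, this]
    simp

theorem bucket_lem (numbers : List Int) (h : ∀ n ∈ numbers, 1 ≤ n) :
    ∀ (b : List (List String)), b.length = 10 → ∀ d : Nat, d < 10 →
    (numbers.foldl altPush b).getD d [] =
      b.getD d [] ++ (numbers.filter (fun n => decide (altLead n = (d : Int)))).map PySem.Int.toStr := by
  induction numbers with
  | nil => intro b hb d hd; simp
  | cons a t ih =>
    intro b hb d hd
    obtain ⟨h1, h9⟩ := altLead_bounds a (h a (by simp))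
    have hpush : altPush b a = b.set (altLead a).toNat ((b.getD (altLead a).toNat []) ++ [PySem.Int.toStr a]) := by
      simp [altPush]; omega
    have hlen : (altPush b a).length = 10 := by rw [hpush]; simpa using hb
    rw [List.foldl_cons, ih (fun n hn => h n (by simp [hn])) _ hlen d hd]
    by_cases hda : altLead a = (d : Int)
    · have hdn : (altLead a).toNat = d := by omega
      rw [hpush, hdn]
      simp only [List.getD, List.getElem?_set_self' ]
      simp [List.filter_cons, hda, List.getD, hb, hd]
    · have hdn : (altLead a).toNat ≠ d := by omega
      rw [hpush]
      simp only [List.getD, List.getElem?_set_ne hdn]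
      simp [List.filter_cons, hda, List.getD]

theorem seg_eq_filter (numbers : List Int) (d : Int) :
    seg numbers (numbers.map altLead) d =
      (numbers.filter (fun n => decide (altLead n = d))).map PySem.Int.toStr := by
  induction numbers with
  | nil => rfl
  | cons a t ih =>
    by_cases hd : altLead a = d <;> simp [seg, hd] at ih ⊢ <;> simp [ih]

-- ===== VERDICT (by name: the statement is the Claim_ definition above) =====
theorem ordD_nine (numbers cmp : List Int) :
    ordD numbers cmp 9 = seg numbers cmp 9 ++ (seg numbers cmp 8 ++ (seg numbers cmp 7 ++
      (seg numbers cmp 6 ++ (seg numbers cmp 5 ++ (seg numbers cmp 4 ++ (seg numbers cmp 3 ++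
      (seg numbers cmp 2 ++ (seg numbers cmp 1 ++ [])))))))) := by
  show ordD numbers cmp (8+1) = _
  rw [ordD]; show _ ++ ordD numbers cmp (7+1) = _
  rw [ordD]; show _ ++ (_ ++ ordD numbers cmp (6+1)) = _
  rw [ordD]; show _ ++ (_ ++ (_ ++ ordD numbers cmp (5+1))) = _
  rw [ordD]; show _ ++ (_ ++ (_ ++ (_ ++ ordD numbers cmp (4+1)))) = _
  rw [ordD]; show _ ++ (_ ++ (_ ++ (_ ++ (_ ++ ordD numbers cmp (3+1))))) = _
  rw [ordD]; show _ ++ (_ ++ (_ ++ (_ ++ (_ ++ (_ ++ ordD numbers cmp (2+1)))))) = _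
  rw [ordD]; show _ ++ (_ ++ (_ ++ (_ ++ (_ ++ (_ ++ (_ ++ ordD numbers cmp (1+1))))))) = _
  rw [ordD]; show _ ++ (_ ++ (_ ++ (_ ++ (_ ++ (_ ++ (_ ++ (_ ++ ordD numbers cmp (0+1)))))))) = _
  rw [ordD, ordD]
  norm_num

theorem solution_spec : Claim_equal_solution := by
  intro numbers _hdom hpre
  show solution numbers = solution_alt numbers
  unfold solution solution_alt
  dsimp only
  -- A's first loop builds the leading-digit list
  have hcmp : (numbers.foldl solPhase1 ([], [])).2 = numbers.map altLead :=
    phase1_cmp numbers hpre ([], [])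
  -- A's selection loop, characterised
  have hb : ∀ x ∈ numbers.map altLead, 0 ≤ x ∧ x ≤ 9 := by
    intro x hx
    obtain ⟨n, hn, rfl⟩ := List.mem_map.mp hx
    have := altLead_bounds n (hpre n hn)
    omega
  have hcnt : (numbers.map altLead).countP (fun x => decide (0 < x)) = (numbers.map altLead).length :=
    List.countP_eq_length.mpr (fun x hx => by
      obtain ⟨n, hn, rfl⟩ := List.mem_map.mp hx
      have := altLead_bounds n (hpre n hn)
      simp; omega)
  have hsel := select_eq numbers (numbers.map altLead).length (numbers.map altLead) []
    (by simp) hb hcnt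
  rw [hcmp, hsel, List.nil_append]
  -- B's buckets, characterised
  have hbuck : ∀ d : Nat, d < 10 →
      (numbers.foldl altPush (List.replicate 10 [])).getD d [] =
        (numbers.filter (fun n => decide (altLead n = (d : Int)))).map PySem.Int.toStr := by
    intro d hd
    rw [bucket_lem numbers hpre (List.replicate 10 []) (by simp) d hd]
    have : (List.replicate (n := 10) (α := List String) []).getD d [] = [] := by
      interval_cases d <;> rfl
    rw [this, List.nil_append]
  have hrange : PySem.List.pyRange 9 (-1) (-1) = [9, 8, 7, 6, 5, 4, 3, 2, 1, 0] := by decide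
  rw [hrange]
  simp only [List.foldl_cons, List.foldl_nil, List.nil_append]
  have hzero : (numbers.filter (fun n => decide (altLead n = ((0 : Nat) : Int)))).map PySem.Int.toStr = [] := by
    rw [List.filter_eq_nil_iff.mpr, List.map_nil]
    intro n hn
    have := altLead_bounds n (hpre n hn)
    simp; omega
  rw [ordD_nine]
  simp only [seg_eq_filter]
  have hg : ∀ d : Int, (0:Int) ≤ d → d ≤ 9 → ((9:Int) - d).toNat < 10 ∧ (((9 - d).toNat :) : Int) = 9 - d := by
    intro d h0 h9; constructor <;> omega
  congr 1
  simp only [show (((0:Int)).toNat) = 0 from rfl, show (((1:Int)).toNat) = 1 from rfl, show (((2:Int)).toNat) = 2 from rfl, show (((3:Int)).toNat) = 3 from rfl, show (((4:Int)).toNat) = 4 from rfl, show (((5:Int)).toNat) = 5 from rfl, show (((6:Int)).toNat) = 6 from rfl, show (((7:Int)).toNat) = 7 from rfl, show (((8:Int)).toNat) = 8 from rfl, show (((9:Int)).toNat) = 9 from rfl]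
  rw [hbuck 9 (by omega), hbuck 8 (by omega), hbuck 7 (by omega), hbuck 6 (by omega),
      hbuck 5 (by omega), hbuck 4 (by omega), hbuck 3 (by omega), hbuck 2 (by omega),
      hbuck 1 (by omega), hbuck 0 (by omega), hzero]
  push_cast
  simp [List.append_assoc]
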